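-- pv_equiv track=rewrite | github.com/NVIDIA/TensorRT-Incubator | tests/helper.py | consolidate_code_blocks
-- ===== SOURCE A (Python) =====
-- from textwrap import dedent, indent
--
-- class DocstringCodeBlock(str):
--     def code(self) -> str:
--         # Special directives can be used in the code blocks and they should be
--         # excluded from the actual code.
--         def is_directive(line):
--             if not line.strip().startswith(":"):
--                 return False
--             tokens = line.strip().split(" ")
--             if not tokens:
--                 return False
--             return tokens[0].endswith(":")
--
--         text = self.replace(".. code-block:: python", "", 1)
--         return "\n".join([line for line in text.splitlines() if not is_directive(line)])
--
-- def consolidate_code_blocks(doc):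
--     """
--     Returns a list containing each line of the docstring as a separate string entry with
--     code blocks consolidated into CodeBlock instances.
--
--     For example, you may end up with something like:
--     [line0, line1, CodeBlock0, line2, line3, CodeBlock1, ...]
--     """
--     # NOTE: If you edit the parsing logic here, please also update `tests/README.md`.
--
--     doc = dedent(doc)
--
--     out = []
--     in_code_block = False
--     for line in doc.splitlines():
--         if in_code_block:
--             # If the line is empty or starts with whitespace, then we're still in the code block.
--             if not line or line.lstrip() != line:
--                 out[-1] = DocstringCodeBlock(out[-1] + line + "\n")
--             else:
--                 in_code_block = False
--
--         # Cannot be an `else` or we'd drop a line.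
--         if not in_code_block:
--             if line.strip().startswith(".. code-block:: python"):
--                 in_code_block = True
--                 out.append(DocstringCodeBlock(line + "\n"))
--             else:
--                 out.append(line)
--
--     return out
-- ===== SOURCE B (Python) =====
-- from textwrap import dedent
--
-- class DocstringCodeBlock(str):
--     def code(self) -> str:
--         def is_directive(line):
--             if not line.strip().startswith(":"):
--                 return False
--             tokens = line.strip().split(" ")
--             if not tokens:
--                 return False
--             return tokens[0].endswith(":")
--
--         text = self.replace(".. code-block:: python", "", 1)
--         return "\n".join([line for line in text.splitlines() if not is_directive(line)])
--
-- def consolidate_code_blocks(doc):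
--     lines = dedent(doc).splitlines()
--     out = []
--     i = 0
--     n = len(lines)
--     while i < n:
--         line = lines[i]
--         if line.strip().startswith(".. code-block:: python"):
--             buf = line + "\n"
--             j = i + 1
--             while j < n and (not lines[j] or lines[j].lstrip() != lines[j]):
--                 buf += lines[j] + "\n"
--                 j += 1
--             out.append(DocstringCodeBlock(buf))
--             i = j  # the terminating line is NOT consumed: reconsider it at the top
--         else:
--             out.append(line)
--             i += 1
--     return out
-- ===== Notes on version B (the rewrite author's own statement) =====
-- stated objective: alternative
-- what changed: Replaces A's single pass with an in_code_block boolean flag and repeated mutation of out[-1] by a two-level loop: an outer index loop that, on seeing a code-block header, runs an inner while-loop consuming the whole block into one buffer before appending it once.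
import Mathlib
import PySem

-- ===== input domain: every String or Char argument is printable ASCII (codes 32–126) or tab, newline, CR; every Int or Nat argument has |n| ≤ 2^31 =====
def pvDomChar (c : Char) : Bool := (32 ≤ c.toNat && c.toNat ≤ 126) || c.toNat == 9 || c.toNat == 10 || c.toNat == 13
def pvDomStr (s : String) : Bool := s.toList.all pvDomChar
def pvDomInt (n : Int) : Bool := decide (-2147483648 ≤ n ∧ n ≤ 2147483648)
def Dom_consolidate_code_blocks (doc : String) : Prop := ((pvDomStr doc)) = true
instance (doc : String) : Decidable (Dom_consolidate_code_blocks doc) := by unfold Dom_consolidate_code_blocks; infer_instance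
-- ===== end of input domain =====

-- B replaces A's boolean `in_code_block` state machine by an explicit two-level loop that
-- consumes each code block with an inner scan (objective: alternative decomposition, same cost).


-- ===== SHARED HELPERS (both Pythons call the same stdlib textwrap.dedent and str.splitlines) =====

def pvIsWsChar (c : Char) : Bool := c = ' ' || c = '\t'

-- longest common prefix of two character lists
def pvLcp : List Char → List Char → List Char
  | a :: as, b :: bs => if a = b then a :: pvLcp as bs else []
  | _, _ => []

-- exact model of CPython 3.11 textwrap.dedent on the Dom alphabet:
-- split on '\n'; blank ([ \t]+) lines become empty; margin = longest common prefix of the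
-- leading [ \t]* runs of lines containing a non-[ \t] character; strip margin where present.
def pvDedent (doc : String) : String :=
  let lines := doc.toList.splitOn '\n'
  let lines := lines.map (fun l => if l ≠ [] ∧ l.all pvIsWsChar then [] else l)
  let indents := lines.filterMap (fun l =>
    if l.any (fun c => !(pvIsWsChar c)) then some (l.takeWhile pvIsWsChar) else none)
  let margin := match indents with
    | [] => []
    | i :: rest => rest.foldl pvLcp i
  String.mk (List.intercalate ['\n']
    (lines.map (fun l => if margin.isPrefixOf l then l.drop margin.length else l)))

-- line.strip().startswith(".. code-block:: python")
def pvStartsCB (line : String) : Bool :=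
  PySem.Str.startswith (PySem.Str.strip line) ".. code-block:: python"

-- not line or line.lstrip() != line
def pvContinues (line : String) : Bool :=
  line = "" || PySem.Str.lstrip line ≠ line

-- ===== PORT A =====
-- the for-loop of A; `out` is kept head-first (Python's out reversed), out[-1] update = modifyHead
def pvALoop : List String → List String → Bool → List String
  | [], out, _ => out.reverse
  | line :: rest, out, icb =>
    if icb then
      if pvContinues line then
        pvALoop rest (out.modifyHead (· ++ line ++ "\n")) true
      else  -- in_code_block := False, then fall through to the not-in-block branch
        if pvStartsCB line then pvALoop rest ((line ++ "\n") :: out) true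
        else pvALoop rest (line :: out) false
    else
      if pvStartsCB line then pvALoop rest ((line ++ "\n") :: out) true
      else pvALoop rest (line :: out) false

def consolidate_code_blocks (doc : String) : List String :=
  pvALoop (PySem.Str.splitlines (pvDedent doc)) [] false

-- ===== PORT B =====
-- inner while-loop: append continuation lines to buf, return (buf, unconsumed suffix)
def pvTakeBlock : List String → String → String × List String
  | [], buf => (buf, [])
  | l :: rest, buf =>
    if pvContinues l then pvTakeBlock rest (buf ++ l ++ "\n") else (buf, l :: rest)

theorem pvTakeBlock_len (ls : List String) (buf : String) :
    (pvTakeBlock ls buf).2.length ≤ ls.length := by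
  induction ls generalizing buf with
  | nil => simp [pvTakeBlock]
  | cons l rest ih =>
    simp only [pvTakeBlock]
    split
    · exact Nat.le_trans (ih _) (Nat.le_succ _)
    · simp

-- outer loop over the lines, explicit index i replaced by the remaining suffix
def pvBLoop : List String → List String
  | [] => []
  | line :: rest =>
    if pvStartsCB line then
      let r := pvTakeBlock rest (line ++ "\n")
      r.1 :: pvBLoop r.2
    else line :: pvBLoop rest
termination_by ls => ls.length
decreasing_by
  · exact Nat.lt_succ_of_le (pvTakeBlock_len rest (line ++ "\n"))
  · simp

def consolidate_code_blocks_alt (doc : String) : List String :=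
  pvBLoop (PySem.Str.splitlines (pvDedent doc))

-- ===== PRECONDITION & SPEC =====
def Spec_consolidate_code_blocks (doc : String) (out : List String) : Prop := out = consolidate_code_blocks_alt doc
instance (doc : String) (out : List String) : Decidable (Spec_consolidate_code_blocks doc out) := by unfold Spec_consolidate_code_blocks; infer_instance

-- ===== CLAIM (what is proved, stated in full; the proofs are below) =====
def Claim_equal_consolidate_code_blocks : Prop := ∀ (doc : String), Dom_consolidate_code_blocks doc → Spec_consolidate_code_blocks doc (consolidate_code_blocks doc)

-- ===== LEMMAS AND PROOFS =====

-- A's loop equals B's loop, for both states of A's flag (the in-block case carries the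
-- growing buffer `buf` at the head of `out`).
theorem pvLoop_agree (ls : List String) :
    (∀ out, pvALoop ls out false = out.reverse ++ pvBLoop ls) ∧
    (∀ out buf, pvALoop ls (buf :: out) true =
      out.reverse ++ (pvTakeBlock ls buf).1 :: pvBLoop (pvTakeBlock ls buf).2) := by
  induction ls with
  | nil => simp [pvALoop, pvBLoop, pvTakeBlock]
  | cons line rest ih =>
    constructor
    · intro out
      by_cases hs : pvStartsCB line = true
      · simp only [pvALoop, pvBLoop, hs, if_true, Bool.false_eq_true, if_false]
        rw [ih.2]
      · simp only [pvALoop, pvBLoop, hs, Bool.false_eq_true, if_false]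
        rw [ih.1]
        simp
    · intro out buf
      by_cases hc : pvContinues line = true
      · simp only [pvALoop, pvTakeBlock, hc, if_true, List.modifyHead_cons]
        exact ih.2 out (buf ++ line ++ "\n")
      · by_cases hs : pvStartsCB line = true
        · simp only [pvALoop, pvTakeBlock, pvBLoop, hc, hs, if_true, Bool.false_eq_true, if_false]
          rw [ih.2]
          simp
        · simp only [pvALoop, pvTakeBlock, pvBLoop, hc, hs, Bool.false_eq_true, if_false]
          rw [ih.1]
          simp

-- ===== VERDICT (by name: the statement is the Claim_ definition above) =====
theorem consolidate_code_blocks_spec : Claim_equal_consolidate_code_blocks := by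
  intro doc _
  unfold Spec_consolidate_code_blocks consolidate_code_blocks consolidate_code_blocks_alt
  simpa using (pvLoop_agree (PySem.Str.splitlines (pvDedent doc))).1 []
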